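-- pv_equiv track=rewrite | github.com/yulaomao/udp------ | decode_stylus_capture.py | candidate_dimensions
-- ===== SOURCE A (Python) =====
-- def candidate_dimensions(payload_size: int) -> list[tuple[int, int]]:
--     candidates = []
--     for width in range(16, min(payload_size, 1024) + 1):
--         if payload_size % width != 0:
--             continue
--         height = payload_size // width
--         if height < 16:
--             continue
--         candidates.append((width, height))
--     return candidates
-- ===== SOURCE B (Python) =====
-- def candidate_dimensions(payload_size: int) -> list[tuple[int, int]]:
--     if payload_size < 16:
--         return []
--     cap = min(payload_size, 1024)
--     small = []
--     large = []
--     d = 1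
--     while d * d <= payload_size:
--         if payload_size % d == 0:
--             small.append(d)
--             q = payload_size // d
--             if q != d:
--                 large.append(q)
--         d += 1
--     widths = small + large[::-1]   # all positive divisors, ascending
--     return [(w, payload_size // w)
--             for w in widths
--             if 16 <= w <= cap and payload_size // w >= 16]
-- ===== Notes on version B (the rewrite author's own statement) =====
-- stated objective: alternative
-- what changed: B enumerates all divisors in one sqrt(n) loop (collecting each divisor d and its cofactor n//d) and then filters the ascending divisor list by the width/height bounds, instead of scanning every width in range(16, min(n,1024)+1) and testing divisibility.
import Mathlib
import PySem

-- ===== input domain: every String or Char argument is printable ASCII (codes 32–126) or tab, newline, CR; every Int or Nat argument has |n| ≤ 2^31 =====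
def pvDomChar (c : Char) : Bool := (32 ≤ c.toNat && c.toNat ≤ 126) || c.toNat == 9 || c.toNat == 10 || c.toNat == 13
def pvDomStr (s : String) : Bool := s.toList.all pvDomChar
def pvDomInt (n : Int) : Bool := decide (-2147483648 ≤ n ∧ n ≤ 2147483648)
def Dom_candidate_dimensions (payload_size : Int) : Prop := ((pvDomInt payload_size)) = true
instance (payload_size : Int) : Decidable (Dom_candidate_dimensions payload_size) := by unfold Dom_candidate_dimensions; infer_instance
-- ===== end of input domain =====

-- B replaces A's linear scan of candidate widths by a sqrt-bounded divisor enumeration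
-- (collect d and n//d for each divisor d ≤ √n, then filter the ascending divisor list);
-- objective: alternative algorithm (not measured faster — A's scan is capped at 1024 steps).

-- ===== PORT A =====
def candidate_dimensions (payload_size : Int) : List (Int × Int) :=
  (PySem.List.pyRange 16 (min payload_size 1024 + 1) 1).foldl
    (fun candidates width =>
      if PySem.Int.mod payload_size width ≠ 0 then candidates
      else
        let height := PySem.Int.floordiv payload_size width
        if height < 16 then candidates
        else candidates ++ [(width, height)]) []

-- ===== PORT B =====
-- termination helper for the while-loop below (cited by decreasing_by)
theorem pvDivLoop_le {d n : Int} (h : d * d ≤ n) : d ≤ n := by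
  by_cases hd : d ≤ 0
  · exact le_trans hd (le_trans (mul_self_nonneg d) h)
  · exact le_trans (by nlinarith) h

-- the 'while d * d <= payload_size' loop of Source B, carrying (small, large)
def pvDivLoop (n d : Int) (small large : List Int) : List Int × List Int :=
  if h : d * d ≤ n then
    if PySem.Int.mod n d = 0 then
      let q := PySem.Int.floordiv n d
      pvDivLoop n (d + 1) (small ++ [d]) (if q ≠ d then large ++ [q] else large)
    else pvDivLoop n (d + 1) small large
  else (small, large)
termination_by (n + 1 - d).toNat
decreasing_by all_goals { have := pvDivLoop_le h; omega }

def candidate_dimensions_alt (payload_size : Int) : List (Int × Int) :=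
  if payload_size < 16 then []
  else
    let cap := min payload_size 1024
    let p := pvDivLoop payload_size 1 [] []
    let widths := p.1 ++ p.2.reverse   -- large[::-1] is list reversal
    (widths.filter (fun w => decide (16 ≤ w) && decide (w ≤ cap) &&
        decide (16 ≤ PySem.Int.floordiv payload_size w))).map
      (fun w => (w, PySem.Int.floordiv payload_size w))

-- ===== PRECONDITION & SPEC =====
def Spec_candidate_dimensions (payload_size : Int) (out : List (Int × Int)) : Prop := out = candidate_dimensions_alt payload_size
instance (payload_size : Int) (out : List (Int × Int)) : Decidable (Spec_candidate_dimensions payload_size out) := by unfold Spec_candidate_dimensions; infer_instance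

-- ===== CLAIM (what is proved, stated in full; the proofs are below) =====
def Claim_equal_candidate_dimensions : Prop := ∀ (payload_size : Int), Dom_candidate_dimensions payload_size → Spec_candidate_dimensions payload_size (candidate_dimensions payload_size)

-- ===== LEMMAS AND PROOFS =====

-- integer square root of a nonnegative Int
def pvRoot (n : Int) : Int := ((Nat.sqrt n.toNat : Nat) : Int)

theorem pvRoot_nonneg (n : Int) : 0 ≤ pvRoot n := by
  unfold pvRoot; exact Int.natCast_nonneg _

theorem pvRoot_sq_le {n : Int} (hn : 0 ≤ n) : pvRoot n * pvRoot n ≤ n := by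
  unfold pvRoot
  have h : Nat.sqrt n.toNat * Nat.sqrt n.toNat ≤ n.toNat := by
    simpa [Nat.pow_two] using Nat.sqrt_le' n.toNat
  have : ((Nat.sqrt n.toNat * Nat.sqrt n.toNat : Nat) : Int) ≤ ((n.toNat : Nat) : Int) := by
    exact_mod_cast h
  simpa [Int.toNat_of_nonneg hn] using this

theorem pvRoot_lt_sq {n : Int} (hn : 0 ≤ n) : n < (pvRoot n + 1) * (pvRoot n + 1) := by
  unfold pvRoot
  have h : n.toNat < (Nat.sqrt n.toNat + 1) * (Nat.sqrt n.toNat + 1) := by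
    simpa [Nat.pow_two, Nat.succ_eq_add_one] using Nat.lt_succ_sqrt' n.toNat
  have : ((n.toNat : Nat) : Int) < (((Nat.sqrt n.toNat + 1) * (Nat.sqrt n.toNat + 1) : Nat) : Int) := by
    exact_mod_cast h
  simpa [Int.toNat_of_nonneg hn] using this

-- d ≥ 1 and d*d ≤ n  ↔  d ≤ pvRoot n
theorem le_pvRoot_of_sq_le {n d : Int} (hd : 1 ≤ d) (h : d * d ≤ n) : d ≤ pvRoot n := by
  have hn : 0 ≤ n := le_trans (mul_self_nonneg d) h
  by_contra hc
  push Not at hc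
  have h1 : pvRoot n + 1 ≤ d := by omega
  have := pvRoot_lt_sq hn
  nlinarith [pvRoot_nonneg n]

theorem sq_le_of_le_pvRoot {n d : Int} (hd : 1 ≤ d) (hn : 0 ≤ n) (h : d ≤ pvRoot n) : d * d ≤ n := by
  have := pvRoot_sq_le hn
  nlinarith

-- the loop collects exactly the divisors d ∈ [d₀, pvRoot n] and their cofactors
theorem pvDivLoop_spec (n : Int) (hn : 1 ≤ n) :
    ∀ (k : Nat) (d : Int), (n + 1 - d).toNat = k → 1 ≤ d → ∀ (small large : List Int),
      pvDivLoop n d small large =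
        (small ++ (PySem.List.pyRange d (pvRoot n + 1) 1).filter
            (fun e => PySem.Int.mod n e == 0),
         large ++ ((PySem.List.pyRange d (pvRoot n + 1) 1).filter
             (fun e => PySem.Int.mod n e == 0 && PySem.Int.floordiv n e != e)).map
           (fun e => PySem.Int.floordiv n e)) := by
  intro k
  induction k using Nat.strong_induction_on with
  | _ k ih =>
    intro d hk hd small large
    rw [pvDivLoop]
    by_cases h : d * d ≤ n
    · have hdr : d ≤ pvRoot n := le_pvRoot_of_sq_le hd h
      have hcons : PySem.List.pyRange d (pvRoot n + 1) 1
          = d :: PySem.List.pyRange (d + 1) (pvRoot n + 1) 1 :=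
        PySem.List.pyRange_one_cons (by omega)
      have hdn : d ≤ n := pvDivLoop_le h
      have hrec := ih (n + 1 - (d + 1)).toNat (by omega) (d + 1) rfl (by omega)
      rw [dif_pos h]
      by_cases hm : PySem.Int.mod n d = 0
      · rw [if_pos hm]
        simp only [hrec]
        by_cases hq : PySem.Int.floordiv n d = d
        · simp [hcons, hm, hq, List.append_assoc]
        · simp [hcons, hm, hq, List.append_assoc]
      · rw [if_neg hm]
        rw [hrec]
        simp [hcons, hm]
    · rw [dif_neg h]
      have hgt : pvRoot n < d := by
        by_contra hc
        push Not at hc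
        exact h (sq_le_of_le_pvRoot hd (by omega) hc)
      simp [PySem.List.pyRange_one_eq_nil (by omega : pvRoot n + 1 ≤ d)]

-- the two divisor lists produced by the loop (started at d = 1), and all widths ascending
def pvS (n : Int) : List Int :=
  (PySem.List.pyRange 1 (pvRoot n + 1) 1).filter (fun e => PySem.Int.mod n e == 0)
def pvF (n : Int) : List Int :=
  (PySem.List.pyRange 1 (pvRoot n + 1) 1).filter
    (fun e => PySem.Int.mod n e == 0 && PySem.Int.floordiv n e != e)
def pvL (n : Int) : List Int := (pvF n).map (fun e => PySem.Int.floordiv n e)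
def pvW (n : Int) : List Int := pvS n ++ (pvL n).reverse

-- cofactor arithmetic for positive divisors
theorem pv_fd_mul {n w : Int} (hw : 0 < w) (hd : w ∣ n) :
    PySem.Int.floordiv n w * w = n := by
  rw [PySem.Int.floordiv_eq_ediv_of_pos hw]; exact Int.ediv_mul_cancel hd

theorem pv_fd_pos {n w : Int} (hn : 1 ≤ n) (hw : 0 < w) (hd : w ∣ n) :
    1 ≤ PySem.Int.floordiv n w := by
  have h := pv_fd_mul hw hd; nlinarith

theorem pv_fd_dvd {n w : Int} (_hn : 1 ≤ n) (hw : 0 < w) (hd : w ∣ n) :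
    PySem.Int.floordiv n w ∣ n :=
  ⟨w, (pv_fd_mul hw hd).symm⟩

theorem pv_fd_fd {n w : Int} (hn : 1 ≤ n) (hw : 0 < w) (hd : w ∣ n) :
    PySem.Int.floordiv n (PySem.Int.floordiv n w) = w := by
  set q := PySem.Int.floordiv n w with hqdef
  have hq : q * w = n := pv_fd_mul hw hd
  have hqpos : 1 ≤ q := pv_fd_pos hn hw hd
  rw [PySem.Int.floordiv_eq_ediv_of_pos (by omega : (0:Int) < q)]
  rw [← hq, Int.mul_ediv_cancel_left _ (by omega)]

theorem pv_fd_anti {n a b : Int} (hn : 1 ≤ n) (ha : 0 < a) (hab : a < b)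
    (hda : a ∣ n) (hdb : b ∣ n) :
    PySem.Int.floordiv n b < PySem.Int.floordiv n a := by
  have h1 := pv_fd_mul ha hda
  have h2 := pv_fd_mul (by omega : (0:Int) < b) hdb
  have p1 := pv_fd_pos hn ha hda
  have p2 := pv_fd_pos hn (by omega : (0:Int) < b) hdb
  nlinarith

-- a cofactor of a strict small divisor lies strictly above the root
theorem pv_large_gt_root {n e : Int} (hn : 1 ≤ n) (he : 1 ≤ e) (her : e ≤ pvRoot n)
    (hd : e ∣ n) (hne : PySem.Int.floordiv n e ≠ e) :
    pvRoot n < PySem.Int.floordiv n e := by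
  have hq := pv_fd_mul (by omega : (0:Int) < e) hd
  have hp := pv_fd_pos hn (by omega : (0:Int) < e) hd
  have hee : e * e ≤ n := sq_le_of_le_pvRoot he (by omega) her
  have hle : e ≤ PySem.Int.floordiv n e := by nlinarith
  have hgt : e < PySem.Int.floordiv n e :=
    lt_of_le_of_ne hle (fun h => hne h.symm)
  by_contra hc
  push Not at hc
  have := sq_le_of_le_pvRoot (by omega : (1:Int) ≤ PySem.Int.floordiv n e) (by omega) hc
  nlinarith

-- membership in the combined width list = positive divisor
theorem pv_mem_F {n e : Int} (he : e ∈ pvF n) :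
    1 ≤ e ∧ e ≤ pvRoot n ∧ e ∣ n ∧ PySem.Int.floordiv n e ≠ e := by
  unfold pvF at he
  simp only [List.mem_filter, PySem.List.mem_pyRange_one, Bool.and_eq_true,
    beq_iff_eq, bne_iff_ne] at he
  exact ⟨he.1.1, by omega, (PySem.Int.mod_eq_zero_iff_dvd n e).mp he.2.1, he.2.2⟩

theorem pv_mem_W {n w : Int} (hn : 1 ≤ n) :
    w ∈ pvW n ↔ 1 ≤ w ∧ PySem.Int.mod n w = 0 := by
  unfold pvW pvS pvL pvF
  simp only [List.mem_append, List.mem_reverse, List.mem_map, List.mem_filter,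
    PySem.List.mem_pyRange_one, Bool.and_eq_true, beq_iff_eq, bne_iff_ne]
  constructor
  · rintro (⟨⟨h1, h2⟩, h3⟩ | ⟨e, ⟨⟨he1, he2⟩, hm, hne⟩, rfl⟩)
    · exact ⟨h1, h3⟩
    · have hd : e ∣ n := (PySem.Int.mod_eq_zero_iff_dvd n e).mp hm
      exact ⟨pv_fd_pos hn (by omega) hd,
        (PySem.Int.mod_eq_zero_iff_dvd n _).mpr (pv_fd_dvd hn (by omega) hd)⟩
  · rintro ⟨hw, hm⟩
    have hd : w ∣ n := (PySem.Int.mod_eq_zero_iff_dvd n w).mp hm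
    by_cases hr : w ≤ pvRoot n
    · exact Or.inl ⟨⟨hw, by omega⟩, hm⟩
    · right
      have hq := pv_fd_mul (by omega : (0:Int) < w) hd
      have hp := pv_fd_pos hn (by omega) hd
      have hww : n < w * w := by
        by_contra hc
        push Not at hc
        exact hr (le_pvRoot_of_sq_le hw hc)
      have hlt : PySem.Int.floordiv n w < w := by nlinarith
      have hsq : PySem.Int.floordiv n w * PySem.Int.floordiv n w ≤ n := by nlinarith
      have hroot := le_pvRoot_of_sq_le hp hsq
      refine ⟨PySem.Int.floordiv n w, ⟨⟨hp, by omega⟩,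
        (PySem.Int.mod_eq_zero_iff_dvd n _).mpr (pv_fd_dvd hn (by omega) hd), ?_⟩,
        pv_fd_fd hn (by omega) hd⟩
      rw [pv_fd_fd hn (by omega) hd]
      omega

-- the width list is strictly increasing
theorem pv_pairwise_W {n : Int} (hn : 1 ≤ n) : (pvW n).Pairwise (· < ·) := by
  have hpF : (pvF n).Pairwise (· < ·) :=
    (PySem.List.pairwise_lt_pyRange_one 1 (pvRoot n + 1)).filter _
  unfold pvW
  rw [List.pairwise_append]
  refine ⟨?_, ?_, ?_⟩
  · exact (PySem.List.pairwise_lt_pyRange_one 1 (pvRoot n + 1)).filter _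
  · unfold pvL
    rw [List.pairwise_reverse, List.pairwise_map]
    refine hpF.imp_of_mem ?_
    intro a b ha hb hab
    obtain ⟨ha1, har, had, -⟩ := pv_mem_F ha
    obtain ⟨hb1, hbr, hbd, -⟩ := pv_mem_F hb
    exact pv_fd_anti hn (by omega) hab had hbd
  · intro a ha b hb
    unfold pvS at ha
    simp only [List.mem_filter, PySem.List.mem_pyRange_one] at ha
    unfold pvL at hb
    rw [List.mem_reverse] at hb
    obtain ⟨e, he, rfl⟩ := List.mem_map.mp hb
    obtain ⟨he1, her, hed, hene⟩ := pv_mem_F he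
    have := pv_large_gt_root hn he1 her hed hene
    omega

-- A's append-loop is a filter-map
theorem pvFoldA (n : Int) (l : List Int) (acc : List (Int × Int)) :
    l.foldl (fun candidates width =>
      if PySem.Int.mod n width ≠ 0 then candidates
      else
        let height := PySem.Int.floordiv n width
        if height < 16 then candidates
        else candidates ++ [(width, height)]) acc
    = acc ++ (l.filter (fun w => decide (PySem.Int.mod n w = 0)
          && decide (16 ≤ PySem.Int.floordiv n w))).map
        (fun w => (w, PySem.Int.floordiv n w)) := by
  induction l generalizing acc with
  | nil => simp
  | cons x xs ih =>
    simp only [List.foldl_cons, List.filter_cons, ih]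
    by_cases h1 : PySem.Int.mod n x = 0
    · by_cases h2 : PySem.Int.floordiv n x < 16
      · simp [h1, h2, show ¬ (16 ≤ PySem.Int.floordiv n x) by omega]
      · simp [h1, h2, show (16 ≤ PySem.Int.floordiv n x) by omega, List.append_assoc]
    · simp [h1]

theorem pv_main {n : Int} (hn : 16 ≤ n) :
    candidate_dimensions n = candidate_dimensions_alt n := by
  have hn1 : (1:Int) ≤ n := by omega
  have hB : candidate_dimensions_alt n
      = ((pvW n).filter (fun w => decide (16 ≤ w) && decide (w ≤ min n 1024) &&
          decide (16 ≤ PySem.Int.floordiv n w))).map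
        (fun w => (w, PySem.Int.floordiv n w)) := by
    unfold candidate_dimensions_alt
    rw [if_neg (by omega)]
    rw [pvDivLoop_spec n hn1 (n + 1 - 1).toNat 1 rfl (by omega) [] []]
    simp [pvW, pvS, pvL, pvF]
  have hA : candidate_dimensions n
      = ((PySem.List.pyRange 16 (min n 1024 + 1) 1).filter
          (fun w => decide (PySem.Int.mod n w = 0)
            && decide (16 ≤ PySem.Int.floordiv n w))).map
        (fun w => (w, PySem.Int.floordiv n w)) := by
    unfold candidate_dimensions
    rw [pvFoldA]
    simp
  rw [hA, hB]
  congr 1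
  -- both filtered width lists are strictly increasing with the same members
  have pwA : ((PySem.List.pyRange 16 (min n 1024 + 1) 1).filter
      (fun w => decide (PySem.Int.mod n w = 0)
        && decide (16 ≤ PySem.Int.floordiv n w))).Pairwise (· < ·) :=
    (PySem.List.pairwise_lt_pyRange_one 16 (min n 1024 + 1)).filter _
  have pwB : ((pvW n).filter (fun w => decide (16 ≤ w) && decide (w ≤ min n 1024) &&
      decide (16 ≤ PySem.Int.floordiv n w))).Pairwise (· < ·) :=
    (pv_pairwise_W hn1).filter _
  have hmem : ∀ w : Int, w ∈ (PySem.List.pyRange 16 (min n 1024 + 1) 1).filter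
      (fun w => decide (PySem.Int.mod n w = 0)
        && decide (16 ≤ PySem.Int.floordiv n w))
      ↔ w ∈ (pvW n).filter (fun w => decide (16 ≤ w) && decide (w ≤ min n 1024) &&
          decide (16 ≤ PySem.Int.floordiv n w)) := by
    intro w
    simp only [List.mem_filter, PySem.List.mem_pyRange_one, Bool.and_eq_true,
      decide_eq_true_eq, pv_mem_W hn1]
    constructor
    · rintro ⟨⟨h1, h2⟩, h3, h4⟩
      exact ⟨⟨by omega, h3⟩, ⟨by omega, by omega⟩, h4⟩
    · rintro ⟨⟨h1, h2⟩, ⟨h3, h4⟩, h5⟩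
      exact ⟨⟨by omega, by omega⟩, h2, h5⟩
  exact ((List.perm_ext_iff_of_nodup (pwA.imp ne_of_lt) (pwB.imp ne_of_lt)).mpr
      hmem).eq_of_pairwise (fun a b _ _ h1 h2 => ((lt_asymm h1) h2).elim) pwA pwB

-- ===== VERDICT (by name: the statement is the Claim_ definition above) =====
theorem candidate_dimensions_spec : Claim_equal_candidate_dimensions := by
  intro n _
  show candidate_dimensions n = candidate_dimensions_alt n
  by_cases h : n < 16
  · have h1 : min n 1024 + 1 ≤ 16 := by omega
    simp [candidate_dimensions, candidate_dimensions_alt,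
      PySem.List.pyRange_one_eq_nil h1, h]
  · exact pv_main (by omega)
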